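-- pv_equiv track=rewrite | github.com/mateuszzzgajda64/matura | macierze_ilosc_dzielnikow_liczb_w_macierzy.py | wypiszDzielniki
-- ===== SOURCE A (Python) =====
-- def podajIloscDzielnikow(liczba):
--     licznik = 0
--     for i in range(1 , liczba + 1 , 1):
--         if liczba % i == 0:
--             licznik = licznik + 1
--     return licznik
--
-- def wypiszDzielniki(macierz):
--     matrix = []
--     for i in range(len(macierz)):
--         wiersz = []
--         for j in range(len(macierz[i])):
--             wiersz.append(podajIloscDzielnikow(macierz[i][j]))
--         matrix.append(wiersz)
--     return matrix
-- ===== SOURCE B (Python) =====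
-- def _iloscDzielnikow(v):
--     # multiplicative divisor-count: factorize by trial division,
--     # answer = product of (exponent + 1); non-positive values give 0
--     if v <= 0:
--         return 0
--     n = v
--     total = 1
--     p = 2
--     while p * p <= n:
--         if n % p == 0:
--             e = 0
--             while n % p == 0:
--                 n //= p
--                 e += 1
--             total *= e + 1
--         p += 1
--     if n > 1:
--         total *= 2
--     return total
--
-- def wypiszDzielniki(macierz):
--     return [[_iloscDzielnikow(v) for v in wiersz] for wiersz in macierz]
-- ===== Notes on version B (the rewrite author's own statement) =====
-- stated objective: faster
-- what changed: The per-element divisor count no longer scans every i in 1..v; B factorizes v by trial division and returns the product of (exponent+1) over the prime factorization, and builds the result matrix with nested comprehensions instead of index loops.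
import Mathlib
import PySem

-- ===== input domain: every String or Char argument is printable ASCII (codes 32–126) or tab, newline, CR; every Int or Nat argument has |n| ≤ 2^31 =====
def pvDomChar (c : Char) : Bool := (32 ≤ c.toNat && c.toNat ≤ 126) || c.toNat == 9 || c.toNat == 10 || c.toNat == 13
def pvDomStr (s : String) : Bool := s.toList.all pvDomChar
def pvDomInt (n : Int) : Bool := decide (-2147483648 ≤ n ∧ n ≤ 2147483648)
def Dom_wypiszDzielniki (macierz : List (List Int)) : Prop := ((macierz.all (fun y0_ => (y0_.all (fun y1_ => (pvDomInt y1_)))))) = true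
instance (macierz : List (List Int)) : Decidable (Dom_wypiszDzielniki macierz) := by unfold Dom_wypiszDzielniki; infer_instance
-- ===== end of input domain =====

-- B replaces A's 1..n divisor scan by trial-division factorization and the
-- multiplicative formula d(n) = ∏ (exponent + 1) (objective: faster per element).


-- ===== PORT A =====
def podajIloscDzielnikow (liczba : Int) : Int :=
  (PySem.List.pyRange 1 (liczba + 1) 1).foldl
    (fun licznik i => if PySem.Int.mod liczba i == 0 then licznik + 1 else licznik) 0

def wypiszDzielniki (macierz : List (List Int)) : List (List Int) :=
  (PySem.List.pyRange 0 (PySem.List.len macierz) 1).foldl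
    (fun matrix i =>
      matrix ++ [(PySem.List.pyRange 0 (PySem.List.len (PySem.List.pyGetD macierz i [])) 1).foldl
        (fun wiersz j =>
          wiersz ++ [podajIloscDzielnikow (PySem.List.pyGetD (PySem.List.pyGetD macierz i []) j 0)]) []])
    []

-- ===== PORT B =====
-- inner 'while n % p == 0: n //= p; e += 1' loop (all values are positive, so Nat is exact)
def pvStrip (n p : Nat) : Nat × Nat :=
  if h : 2 ≤ p ∧ 0 < n ∧ p ∣ n then
    let r := pvStrip (n / p) p
    (r.1 + 1, r.2)
  else (0, n)
termination_by n
decreasing_by exact Nat.div_lt_self h.2.1 h.1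

theorem pvStrip_snd_le (n p : Nat) : (pvStrip n p).2 ≤ n := by
  induction n using Nat.strong_induction_on with
  | _ n ih =>
    rw [pvStrip]
    split
    · next h =>
      have hlt := Nat.div_lt_self h.2.1 h.1
      exact le_trans (ih _ hlt) (Nat.le_of_lt hlt)
    · exact le_refl n

-- outer 'while p * p <= n' loop, carrying the running product 'total'
def pvLoop (n p total : Nat) : Nat :=
  if p * p ≤ n then
    if n % p = 0 then
      let r := pvStrip n p
      pvLoop r.2 (p + 1) (total * (r.1 + 1))
    else pvLoop n (p + 1) total
  else if 1 < n then total * 2 else total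
termination_by (n, n + 1 - p)
decreasing_by
  · rcases Nat.lt_or_ge p 2 with hp | hp
    · have hs : (pvStrip n p).2 = n := by rw [pvStrip, dif_neg (by omega)]
      apply Prod.Lex.right'
      · rw [hs]
      · rw [hs]
        have hmod : n % p = 0 := ‹n % p = 0›
        interval_cases p <;> omega
    · apply Prod.Lex.left
      have h0 : 0 < n := by nlinarith
      have hd : p ∣ n := Nat.dvd_iff_mod_eq_zero.mpr ‹n % p = 0›
      calc (pvStrip n p).2 ≤ n / p := by
            rw [pvStrip, dif_pos ⟨hp, h0, hd⟩]; exact pvStrip_snd_le _ _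
        _ < n := Nat.div_lt_self h0 hp
  · apply Prod.Lex.right'
    · exact le_refl n
    · have hpn : p ≤ n := by nlinarith
      omega

def iloscDzielnikow_alt (v : Int) : Int :=
  if v ≤ 0 then 0 else ((pvLoop v.toNat 2 1 : Nat) : Int)

def wypiszDzielniki_alt (macierz : List (List Int)) : List (List Int) :=
  macierz.map (fun wiersz => wiersz.map iloscDzielnikow_alt)

-- ===== PRECONDITION & SPEC =====
def Spec_wypiszDzielniki (macierz : List (List Int)) (out : List (List Int)) : Prop := out = wypiszDzielniki_alt macierz
instance (macierz : List (List Int)) (out : List (List Int)) : Decidable (Spec_wypiszDzielniki macierz out) := by unfold Spec_wypiszDzielniki; infer_instance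

-- ===== CLAIM (what is proved, stated in full; the proofs are below) =====
def Claim_equal_wypiszDzielniki : Prop := ∀ (macierz : List (List Int)), Dom_wypiszDzielniki macierz → Spec_wypiszDzielniki macierz (wypiszDzielniki macierz)

-- ===== LEMMAS AND PROOFS =====

theorem countA (n : Nat) :
    (List.countP (fun k => decide ((1 + (k:Nat)) ∣ n)) (List.range n)) = n.divisors.card := by
  have h1 : n.divisors = Finset.filter (· ∣ n) (Finset.Ico 1 (n+1)) := Finset.val_inj.mp rfl
  have h2 : Finset.Ico 1 (n+1) = ⟨List.range' 1 n, List.nodup_range'⟩ := Finset.val_inj.mp rfl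
  rw [h1, h2]
  simp only [Finset.filter, Finset.card]
  rw [show ((Multiset.filter (· ∣ n) ↑(List.range' 1 n)).card) = (List.range' 1 n).countP (fun k => decide (k ∣ n)) by
    simp [List.countP_eq_length_filter]]
  rw [List.range'_eq_map_range, List.countP_map]
  rfl

theorem podaj_eq' (v : Int) :
    podajIloscDzielnikow v = if 1 ≤ v then ((v.toNat.divisors.card : Nat) : Int) else 0 := by
  unfold podajIloscDzielnikow
  rw [PySem.List.foldl_count_if]
  by_cases hv : 1 ≤ v
  · rw [if_pos hv]
    have hpred : (fun i : Int => PySem.Int.mod v i == 0) = (fun i : Int => decide (i ∣ v)) := by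
      funext i; rw [Bool.eq_iff_iff]; simp [PySem.Int.mod_eq_zero_iff_dvd]
    rw [hpred, PySem.List.pyRange_one, List.countP_map]
    have hvn : v = (v.toNat : Int) := (Int.toNat_of_nonneg (by omega)).symm
    have h3 : ((v + 1 - 1).toNat) = v.toNat := by omega
    rw [h3]
    have h4 : ∀ k : Nat, ((fun i : Int => decide (i ∣ v)) ∘ (fun k : Nat => (1:Int) + k)) k
        = (fun k : Nat => decide ((1 + k) ∣ v.toNat)) k := by
      intro k
      simp only [Function.comp]
      rw [Bool.eq_iff_iff]
      simp only [decide_eq_true_eq]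
      rw [hvn]
      constructor <;> intro h <;> exact_mod_cast h
    rw [List.countP_congr (fun k _ => by rw [h4 k]), countA]
    omega
  · rw [if_neg hv, PySem.List.pyRange_one_eq_nil (by omega)]
    simp

theorem pvStrip_spec (n p : Nat) (hp : 2 ≤ p) (hn : 0 < n) :
    n = p ^ (pvStrip n p).1 * (pvStrip n p).2 ∧ ¬ p ∣ (pvStrip n p).2 := by
  induction n using Nat.strong_induction_on with
  | _ n ih =>
    rw [pvStrip]
    by_cases h : p ∣ n
    · rw [dif_pos ⟨hp, hn, h⟩]
      have hlt := Nat.div_lt_self hn hp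
      have h0 : 0 < n / p := Nat.div_pos (Nat.le_of_dvd hn h) (by omega)
      obtain ⟨h1, h2⟩ := ih (n / p) hlt h0
      refine ⟨?_, h2⟩
      simp only []
      calc n = n / p * p := (Nat.div_mul_cancel h).symm
        _ = p ^ ((pvStrip (n / p) p).1 + 1) * (pvStrip (n / p) p).2 := by
            rw [pow_succ]; nth_rewrite 1 [h1]; ring
    · rw [dif_neg (by tauto)]
      simpa using h

-- no prime < p divides n, and p*p > n, n > 1  ⇒  n is prime
theorem prime_of_no_small (n p : Nat) (hn : 1 < n) (hlt : n < p * p)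
    (hsmall : ∀ q, 2 ≤ q → q < p → ¬ q ∣ n) : n.Prime := by
  by_contra hnp
  have hm := Nat.minFac_dvd n
  have hmp : (Nat.minFac n).Prime := Nat.minFac_prime (by omega)
  have h2 : 2 ≤ n.minFac := hmp.two_le
  have hge : p ≤ n.minFac := by
    by_contra hc
    exact hsmall n.minFac h2 (by omega) hm
  have := Nat.minFac_sq_le_self (by omega) hnp
  nlinarith [this]

theorem card_divisors_prime (p : Nat) (pp : p.Prime) : p.divisors.card = 2 := by
  rw [pp.divisors, Finset.card_insert_of_notMem (by simp [pp.ne_one.symm]), Finset.card_singleton]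

theorem card_divisors_prime_pow (p e : Nat) (pp : p.Prime) : (p ^ e).divisors.card = e + 1 := by
  rw [Nat.divisors_prime_pow pp, Finset.card_map, Finset.card_range]

theorem pvLoop_eq (n p total : Nat) : 1 ≤ n → 2 ≤ p →
    (∀ q, 2 ≤ q → q < p → ¬ q ∣ n) →
    pvLoop n p total = total * n.divisors.card := by
  induction n, p, total using pvLoop.induct with
  | case1 n p total hle hmod r ih =>
    intro hn hp hsmall
    rw [pvLoop, if_pos hle, if_pos hmod]
    show pvLoop (pvStrip n p).2 (p + 1) (total * ((pvStrip n p).1 + 1)) = _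
    have hd : p ∣ n := Nat.dvd_iff_mod_eq_zero.mpr hmod
    obtain ⟨h1, h2⟩ := pvStrip_spec n p hp (by omega)
    have hpp : p.Prime := by
      have hmp : p.minFac ∣ n := dvd_trans (Nat.minFac_dvd p) hd
      have h2p : 2 ≤ p.minFac := (Nat.minFac_prime (by omega)).two_le
      have : ¬ p.minFac < p := fun hc => hsmall _ h2p hc hmp
      have hle' : p.minFac ≤ p := Nat.minFac_le (by omega)
      have : p.minFac = p := by omega
      exact this ▸ Nat.minFac_prime (by omega : p ≠ 1)
    have hm1 : 1 ≤ (pvStrip n p).2 := by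
      rcases Nat.eq_zero_or_pos (pvStrip n p).2 with h | h
      · rw [h, mul_zero] at h1; omega
      · exact h
    have he1 : 1 ≤ (pvStrip n p).1 := by
      rcases Nat.eq_zero_or_pos (pvStrip n p).1 with h | h
      · rw [h, pow_zero, one_mul] at h1; exact absurd (h1 ▸ hd) h2
      · exact h
    have hsmall' : ∀ q, 2 ≤ q → q < p + 1 → ¬ q ∣ (pvStrip n p).2 := by
      intro q hq2 hqp hdvd
      rcases Nat.lt_or_ge q p with h | h
      · exact hsmall q hq2 h (hdvd.trans (Dvd.intro_left _ h1.symm))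
      · have : q = p := by omega
        exact h2 (this ▸ hdvd)
    have hcop : (p ^ (pvStrip n p).1).Coprime (pvStrip n p).2 :=
      (Nat.Prime.coprime_iff_not_dvd hpp |>.mpr h2).pow_left _
    have hcard : n.divisors.card = ((pvStrip n p).1 + 1) * (pvStrip n p).2.divisors.card := by
      conv_lhs => rw [h1]
      rw [hcop.card_divisors_mul, card_divisors_prime_pow _ _ hpp]
    rw [ih hm1 (by omega) hsmall', hcard]
    ring
  | case2 n p total hle hmod ih =>
    intro hn hp hsmall
    rw [pvLoop, if_pos hle, if_neg hmod]
    refine ih hn (by omega) (fun q h2q hq hdvd => ?_)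
    rcases Nat.lt_or_ge q p with h | h
    · exact hsmall q h2q h hdvd
    · have : q = p := by omega
      exact hmod (this ▸ (Nat.dvd_iff_mod_eq_zero.mp hdvd))
  | case3 n p total hle h1 =>
    intro hn hp hsmall
    rw [pvLoop, if_neg hle, if_pos h1]
    have hprime : n.Prime := prime_of_no_small n p h1 (by omega) hsmall
    rw [card_divisors_prime n hprime]
  | case4 n p total hle h1 =>
    intro hn hp hsmall
    rw [pvLoop, if_neg hle, if_neg h1]
    have : n = 1 := by omega
    subst this
    simp [Nat.divisors_one]

theorem alt_eq (v : Int) :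
    iloscDzielnikow_alt v = if 1 ≤ v then ((v.toNat.divisors.card : Nat) : Int) else 0 := by
  unfold iloscDzielnikow_alt
  by_cases hv : v ≤ 0
  · rw [if_pos hv, if_neg (by omega)]
  · rw [if_neg hv, if_pos (by omega)]
    rw [pvLoop_eq v.toNat 2 1 (by omega) (le_refl 2) (fun q h2 hq => by omega)]
    simp

theorem fun_eq : podajIloscDzielnikow = iloscDzielnikow_alt := by
  funext v; rw [podaj_eq', alt_eq]

theorem the_spec (macierz : List (List Int)) :
    wypiszDzielniki macierz = wypiszDzielniki_alt macierz := by
  unfold wypiszDzielniki wypiszDzielniki_alt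
  rw [PySem.List.foldl_pyRange_zero_pyGetD macierz []
    (fun matrix row => matrix ++ [(PySem.List.pyRange 0 (PySem.List.len row) 1).foldl
      (fun wiersz j => wiersz ++ [podajIloscDzielnikow (PySem.List.pyGetD row j 0)]) []]) []]
  rw [PySem.List.foldl_append_singleton_eq_map]
  rw [List.nil_append]
  refine List.map_congr_left (fun row _ => ?_)
  rw [PySem.List.foldl_pyRange_zero_pyGetD row 0
    (fun wiersz x => wiersz ++ [podajIloscDzielnikow x]) []]
  rw [PySem.List.foldl_append_singleton_eq_map, List.nil_append, fun_eq]

-- ===== VERDICT (by name: the statement is the Claim_ definition above) =====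
theorem wypiszDzielniki_spec : Claim_equal_wypiszDzielniki := by
  intro macierz _
  unfold Spec_wypiszDzielniki
  exact the_spec macierz
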